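-- pv_equiv track=rewrite | github.com/aidencullo/problems | problems/meta/level_1/Kaitenzushi/solution.py | getMaximumEatenDishCount
-- ===== SOURCE A (Python) =====
-- from typing import List
-- from collections import deque
--
-- def getMaximumEatenDishCount(N: int, D: List[int], K: int) -> int:
--   # Write your code here
--   eaten = 0
--   recent = deque()
--   search_set = set()
--   for index, dish in enumerate(D):
--     if dish not in search_set:
--       eaten += 1
--       recent.append(dish)
--       search_set.add(dish)
--       if len(recent) > K:
--         search_set.remove(recent.popleft())
--   return eaten
-- ===== SOURCE B (Python) =====
-- def getMaximumEatenDishCount(N, D, K):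
--     # Timestamp dict: last[dish] = eaten-count when dish was last eaten.
--     eaten = 0
--     last = {}
--     for dish in D:
--         if dish not in last or eaten - last[dish] >= K:
--             eaten += 1
--             last[dish] = eaten
--     return eaten
-- ===== Notes on version B (the rewrite author's own statement) =====
-- stated objective: idiomatic
-- what changed: Replaces the deque+set sliding window (explicit FIFO eviction) with a single dict mapping each dish to the eaten-count at which it was last eaten, deciding edibility by the arithmetic staleness test eaten - last[dish] >= K.
import Mathlib
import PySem

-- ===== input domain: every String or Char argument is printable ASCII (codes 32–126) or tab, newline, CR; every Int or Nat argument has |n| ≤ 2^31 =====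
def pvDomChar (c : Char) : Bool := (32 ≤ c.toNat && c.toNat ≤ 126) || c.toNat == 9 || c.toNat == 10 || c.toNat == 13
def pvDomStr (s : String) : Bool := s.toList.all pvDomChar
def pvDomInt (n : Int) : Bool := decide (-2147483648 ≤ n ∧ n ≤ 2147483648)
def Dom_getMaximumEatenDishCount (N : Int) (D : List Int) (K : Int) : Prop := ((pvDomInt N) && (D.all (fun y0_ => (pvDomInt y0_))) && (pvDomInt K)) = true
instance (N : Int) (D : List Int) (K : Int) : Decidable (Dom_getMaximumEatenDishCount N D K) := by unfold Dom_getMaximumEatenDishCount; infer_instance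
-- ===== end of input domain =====

-- B replaces A's deque+set sliding window by a dict of last-eaten timestamps with an
-- arithmetic staleness test (idiomatic, same O(n) cost); proved to return the same count.

-- ===== PORT A =====
-- One iteration of A's loop body; state = (eaten, recent deque front-first, search_set).
-- The [] and none fallbacks below are unreachable (we just appended, and the popped head
-- is in the set): Python's deque.popleft()/set.remove never raise here.
def stepA (K : Int) (st : Int × List Int × PySem.Set Int) (dish : Int) : Int × List Int × PySem.Set Int :=
  match st with
  | (eaten, recent, searchSet) =>
    if PySem.Set.contains searchSet dish then (eaten, recent, searchSet)
    else
      let eaten' := eaten + 1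
      let recent' := recent ++ [dish]
      let s' := PySem.Set.add searchSet dish
      if ((recent'.length : Int) > K) then
        match recent' with
        | [] => (eaten', recent', s')            -- unreachable
        | h :: t =>
          match PySem.Set.remove? s' h with
          | some s'' => (eaten', t, s'')
          | none => (eaten', t, s')              -- unreachable
      else (eaten', recent', s')

-- the enumerate index of A's loop is unused, so the fold runs over D directly
def getMaximumEatenDishCount (N : Int) (D : List Int) (K : Int) : Int :=
  (D.foldl (stepA K) ((0 : Int), ([] : List Int), (PySem.Set.empty : PySem.Set Int))).1

-- ===== PORT B =====
-- One iteration of B's loop body; state = (eaten, last = dish ↦ eaten-count at last eat).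
def stepB (K : Int) (st : Int × PySem.Dict Int Int) (dish : Int) : Int × PySem.Dict Int Int :=
  match st with
  | (eaten, last) =>
    let eat : Bool :=
      match PySem.Dict.get? last dish with
      | none => true                              -- dish not in last
      | some v => decide (eaten - v ≥ K)          -- or eaten - last[dish] >= K
    if eat then (eaten + 1, PySem.Dict.insert last dish (eaten + 1)) else (eaten, last)

def getMaximumEatenDishCount_alt (N : Int) (D : List Int) (K : Int) : Int :=
  (D.foldl (stepB K) ((0 : Int), (PySem.Dict.empty : PySem.Dict Int Int))).1

-- ===== PRECONDITION & SPEC =====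
def Spec_getMaximumEatenDishCount (N : Int) (D : List Int) (K : Int) (out : Int) : Prop := out = getMaximumEatenDishCount_alt N D K
instance (N : Int) (D : List Int) (K : Int) (out : Int) : Decidable (Spec_getMaximumEatenDishCount N D K out) := by unfold Spec_getMaximumEatenDishCount; infer_instance

-- ===== CLAIM (what is proved, stated in full; the proofs are below) =====
def Claim_equal_getMaximumEatenDishCount : Prop := ∀ (N : Int) (D : List Int) (K : Int), Dom_getMaximumEatenDishCount N D K → Spec_getMaximumEatenDishCount N D K (getMaximumEatenDishCount N D K)

-- ===== LEMMAS AND PROOFS =====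

-- Coupling invariant between A's state (e, recent, s) and B's dict `last`:
-- the deque lists, oldest first, the dishes eaten at counts e - |recent| + 1, …, e;
-- the set mirrors the deque; dishes off the deque are absent from `last` or stale.
def WinInv (K e : Int) (recent : List Int) (s : PySem.Set Int) (last : PySem.Dict Int Int) : Prop :=
  recent.Nodup ∧ s.Nodup ∧
  (∀ x, x ∈ s ↔ x ∈ recent) ∧
  ((recent.length : Int) ≤ K ∨ recent = []) ∧
  (∀ i : Nat, (h : i < recent.length) → PySem.Dict.get? last recent[i] = some (e - recent.length + i + 1)) ∧
  (∀ x, x ∉ recent → ∀ v, PySem.Dict.get? last x = some v → e - v ≥ K)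

lemma step_coupling (K e : Int) (recent : List Int) (s : PySem.Set Int)
    (last : PySem.Dict Int Int) (dish : Int) (hInv : WinInv K e recent s last) :
    (stepA K (e, recent, s) dish).1 = (stepB K (e, last) dish).1 ∧
    WinInv K (stepA K (e, recent, s) dish).1 (stepA K (e, recent, s) dish).2.1
      (stepA K (e, recent, s) dish).2.2 (stepB K (e, last) dish).2 := by
  obtain ⟨hnr, hns, hmemiff, hlen, hidx, hstale⟩ := hInv
  by_cases hmem : dish ∈ recent
  · -- dish inside the window: neither program eats
    have hcs : PySem.Set.contains s dish = true :=
      (PySem.Set.contains_iff s dish).mpr ((hmemiff dish).mpr hmem)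
    obtain ⟨i, hi, hdi⟩ := List.mem_iff_getElem.mp hmem
    have hget := hidx i hi
    rw [hdi] at hget
    have hLle : (recent.length : Int) ≤ K := hlen.resolve_right (List.ne_nil_of_mem hmem)
    have hiL : (i : Int) < (recent.length : Int) := by exact_mod_cast hi
    have heat : decide (e - (e - (recent.length : Int) + (i : Int) + 1) ≥ K) = false := by
      rw [decide_eq_false_iff_not]; omega
    simp only [stepA, stepB, hcs, hget, heat, if_true]
    exact ⟨rfl, hnr, hns, hmemiff, hlen, hidx, hstale⟩
  · -- dish not in the window: both programs eat it
    have hds : dish ∉ s := fun h => hmem ((hmemiff dish).mp h)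
    have hcs : PySem.Set.contains s dish = false :=
      Bool.eq_false_iff.mpr (fun h => hds ((PySem.Set.contains_iff _ _).mp h))
    have heatB : stepB K (e, last) dish = (e + 1, PySem.Dict.insert last dish (e + 1)) := by
      simp only [stepB]
      cases hg : PySem.Dict.get? last dish with
      | none => simp
      | some v =>
        have hv := hstale dish hmem v hg
        simp [hv]
    rw [heatB]
    by_cases hpop : (((recent ++ [dish]).length : Int) > K)
    · -- the window overflows: pop the oldest dish
      cases recent with
      | nil =>
        have hK0 : K ≤ 0 := by simp at hpop; omega
        have hd1 : dish ∈ PySem.Set.add s dish := (PySem.Set.mem_add s dish dish).mpr (Or.inr rfl)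
        have hrem := PySem.Set.remove?_of_mem hd1
        have hcond : ((([dish] : List Int).length : Int) > K) := by simpa using hpop
        simp only [stepA, hcs, Bool.false_eq_true, if_false, List.nil_append, if_pos hcond, hrem]
        refine ⟨trivial, List.nodup_nil, PySem.Set.nodup_discard _ _ (PySem.Set.nodup_add s dish hns), ?_, Or.inr rfl, ?_, ?_⟩
        · intro x
          rw [PySem.Set.mem_discard, PySem.Set.mem_add]
          constructor
          · rintro ⟨hx | rfl, hne⟩
            · exact (List.not_mem_nil ((hmemiff x).mp hx)).elim
            · exact (hne rfl).elim
          · intro hx; exact absurd hx (List.not_mem_nil)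
        · intro i hi; simp at hi
        · intro x _ v hv
          by_cases hxd : x = dish
          · subst hxd
            rw [PySem.Dict.get?_insert] at hv
            simp at hv
            omega
          · rw [PySem.Dict.get?_insert, if_neg hxd] at hv
            have := hstale x (by simp) v hv
            omega
      | cons r0 rs =>
        have hr0s : r0 ∈ PySem.Set.add s dish :=
          (PySem.Set.mem_add s dish r0).mpr (Or.inl ((hmemiff r0).mpr List.mem_cons_self))
        have hrem := PySem.Set.remove?_of_mem hr0s
        have hLK : ((r0 :: rs).length : Int) ≤ K := hlen.resolve_right (by simp)
        have hr0d : r0 ≠ dish := fun h => hmem (h ▸ List.mem_cons_self)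
        have hdrs : dish ∉ rs := fun h => hmem (List.mem_cons_of_mem r0 h)
        have hcond : (((r0 :: (rs ++ [dish])).length : Int) > K) := by simpa using hpop
        simp only [stepA, hcs, Bool.false_eq_true, if_false, List.cons_append, if_pos hcond, hrem]
        refine ⟨trivial, ?_, PySem.Set.nodup_discard _ _ (PySem.Set.nodup_add s dish hns), ?_, ?_, ?_, ?_⟩
        · -- Nodup (rs ++ [dish])
          have := hnr
          simp only [List.nodup_cons] at this
          simp only [List.nodup_append, List.nodup_singleton, true_and]
          refine ⟨this.2, ?_⟩
          intro a ha b hb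
          rw [List.mem_singleton] at hb
          exact fun h => hdrs ((h.trans hb) ▸ ha)
        · -- membership of the new set
          intro x
          rw [PySem.Set.mem_discard, PySem.Set.mem_add]
          have hr0rs : r0 ∉ rs := by
            have := hnr; simp only [List.nodup_cons] at this; exact this.1
          constructor
          · rintro ⟨hx | rfl, hne⟩
            · have : x ∈ r0 :: rs := (hmemiff x).mp hx
              rcases List.mem_cons.mp this with rfl | hx'
              · exact (hne rfl).elim
              · exact List.mem_append.mpr (Or.inl hx')
            · exact List.mem_append.mpr (Or.inr (List.mem_singleton.mpr rfl))
          · intro hx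
            rcases List.mem_append.mp hx with hx' | hx'
            · exact ⟨Or.inl ((hmemiff x).mpr (List.mem_cons_of_mem r0 hx')),
                fun h => hr0rs (h ▸ hx')⟩
            · have : x = dish := List.mem_singleton.mp hx'
              exact ⟨Or.inr this, this ▸ hr0d.symm⟩
        · -- length bound
          left
          simp only [List.length_append, List.length_singleton]
          simp only [List.length_cons] at hLK
          push_cast at hLK ⊢
          omega
        · -- timestamps of the new window
          intro i hi
          simp only [List.length_append, List.length_singleton] at hi
          by_cases hiL : i < rs.length
          · have helem : (rs ++ [dish])[i] = rs[i] := List.getElem_append_left hiL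
            have hmemi : rs[i] ∈ rs := List.getElem_mem hiL
            have hne : rs[i] ≠ dish := fun h => hdrs (h ▸ hmemi)
            have hidx1 := hidx (i + 1) (by simpa using Nat.succ_lt_succ hiL)
            simp only [List.getElem_cons_succ] at hidx1
            rw [helem, PySem.Dict.get?_insert, if_neg hne, hidx1]
            simp only [Option.some.injEq, List.length_cons, List.length_append, List.length_nil]
            push_cast
            omega
          · have hieq : i = rs.length := by omega
            subst hieq
            rw [List.getElem_concat_length rfl, PySem.Dict.get?_insert, if_pos rfl]
            simp only [Option.some.injEq, List.length_append, List.length_singleton]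
            push_cast
            omega
        · -- staleness outside the new window
          intro x hx v hv
          have hxd : x ≠ dish := fun h => hx (h ▸ List.mem_append.mpr (Or.inr (List.mem_singleton.mpr rfl)))
          have hxrs : x ∉ rs := fun h => hx (List.mem_append.mpr (Or.inl h))
          rw [PySem.Dict.get?_insert, if_neg hxd] at hv
          by_cases hxr0 : x = r0
          · subst hxr0
            have hidx0 := hidx 0 (by simp)
            simp only [List.getElem_cons_zero] at hidx0
            rw [hidx0] at hv
            injection hv with hv'
            have h1 : (((x :: rs).length : Int)) = (rs.length : Int) + 1 := by simp
            have h2 : ((((x :: rs) ++ [dish]).length : Int)) = (rs.length : Int) + 2 := by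
              simp; ring
            omega
          · have : x ∉ r0 :: rs := by
              intro h
              rcases List.mem_cons.mp h with h' | h'
              · exact hxr0 h'
              · exact hxrs h'
            have := hstale x this v hv
            omega
    · -- no pop: window still fits
      simp only [stepA, hcs, Bool.false_eq_true, if_false, if_neg hpop]
      refine ⟨trivial, ?_, PySem.Set.nodup_add s dish hns, ?_, ?_, ?_, ?_⟩
      · simp only [List.nodup_append, List.nodup_singleton, true_and]
        refine ⟨hnr, ?_⟩
        intro a ha b hb
        rw [List.mem_singleton] at hb
        exact fun h => hmem ((h.trans hb) ▸ ha)
      · intro x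
        rw [PySem.Set.mem_add]
        constructor
        · rintro (hx | rfl)
          · exact List.mem_append.mpr (Or.inl ((hmemiff x).mp hx))
          · exact List.mem_append.mpr (Or.inr (List.mem_singleton.mpr rfl))
        · intro hx
          rcases List.mem_append.mp hx with hx' | hx'
          · exact Or.inl ((hmemiff x).mpr hx')
          · exact Or.inr (List.mem_singleton.mp hx')
      · left
        simp only [List.length_append, List.length_singleton] at hpop ⊢
        push_cast at hpop ⊢
        omega
      · intro i hi
        simp only [List.length_append, List.length_singleton] at hi
        by_cases hiL : i < recent.length
        · have helem : (recent ++ [dish])[i] = recent[i] := List.getElem_append_left hiL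
          have hmemi : recent[i] ∈ recent := List.getElem_mem hiL
          have hne : recent[i] ≠ dish := fun h => hmem (h ▸ hmemi)
          rw [helem, PySem.Dict.get?_insert, if_neg hne, hidx i hiL]
          simp only [Option.some.injEq, List.length_append, List.length_singleton]
          push_cast
          omega
        · have hieq : i = recent.length := by omega
          subst hieq
          rw [List.getElem_concat_length rfl, PySem.Dict.get?_insert, if_pos rfl]
          simp only [Option.some.injEq, List.length_append, List.length_singleton]
          push_cast
          omega
      · intro x hx v hv
        have hxd : x ≠ dish := fun h => hx (h ▸ List.mem_append.mpr (Or.inr (List.mem_singleton.mpr rfl)))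
        have hxr : x ∉ recent := fun h => hx (List.mem_append.mpr (Or.inl h))
        rw [PySem.Dict.get?_insert, if_neg hxd] at hv
        have := hstale x hxr v hv
        omega

lemma fold_coupling (K : Int) (D : List Int) :
    ∀ (e : Int) (recent : List Int) (s : PySem.Set Int) (last : PySem.Dict Int Int),
    WinInv K e recent s last →
    (D.foldl (stepA K) (e, recent, s)).1 = (D.foldl (stepB K) (e, last)).1 := by
  induction D with
  | nil => intro e recent s last _; rfl
  | cons d D ih =>
    intro e recent s last hInv
    obtain ⟨h1, h2⟩ := step_coupling K e recent s last d hInv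
    simp only [List.foldl_cons]
    have hB2 : stepB K (e, last) d = ((stepA K (e, recent, s) d).1, (stepB K (e, last) d).2) := by
      rw [h1]
    rw [hB2,
      show stepA K (e, recent, s) d
        = ((stepA K (e, recent, s) d).1, (stepA K (e, recent, s) d).2.1,
           (stepA K (e, recent, s) d).2.2) from rfl]
    exact ih _ _ _ _ h2

-- ===== VERDICT (by name: the statement is the Claim_ definition above) =====
theorem getMaximumEatenDishCount_spec : Claim_equal_getMaximumEatenDishCount := by
  intro N D K _
  unfold Spec_getMaximumEatenDishCount getMaximumEatenDishCount getMaximumEatenDishCount_alt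
  exact fold_coupling K D 0 [] PySem.Set.empty PySem.Dict.empty
    (by
      refine ⟨List.nodup_nil, List.nodup_nil, fun x => Iff.rfl, Or.inr rfl, ?_, ?_⟩
      · intro i hi; exact absurd hi (by simp)
      · intro x _ v hv
        rw [PySem.Dict.get?_empty] at hv
        cases hv)
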